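-- pv_equiv track=rewrite | github.com/kaushalaneesha/juggling-code | Leetcode/maximum_score.py | solve
-- ===== SOURCE A (Python) =====
-- import collections
--
-- def solve(A, B):
--     cache = collections.defaultdict(int) # Store the gcd for a subproblem.
--                # Key will be the bitmask idicating what keys are already selected and which are left
--                # 2 ^ n numbers where n = 2 * A
--     gcd = [[0 for i in range(len(B))] for j in range(len(B))]
--     def computeGCD(x, y):
--         while y:
--             x, y = y, x % y
--         return x
--
--     def dfs(mask, operation):
--         if mask in cache:
--             return cache.get(mask)
--         # calculate the score for all possible combination of 2 numbers
--         for i in range(len(B)):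
--             if (1 << i) & mask:
--                 continue
--             for j in range(i + 1, len(B)):
--                 # check if i and j are already selected in the mask
--                 if (1 << j) & mask:
--                     continue
--                 # since we are selecting i and j. Mark them as 1 in the mask ( using OR )
--                 newMask = mask | (1 << i) | (1 << j)
--                 score = operation * gcd[i][j]
--                 cache[mask] = max(cache[mask], score + dfs(newMask, operation + 1))
--         return cache[mask]
--
--     #Compute gcd of all possible values
--     for i in range(len(B)):
--         for j in range (i + 1, len(B)):
--             gcd[i][j] = computeGCD(B[i], B[j])
--     return dfs(0, 1)
-- ===== SOURCE B (Python) =====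
-- def solve(A, B):
--     n = len(B)
--
--     def computeGCD(x, y):
--         while y:
--             x, y = y, x % y
--         return x
--
--     g = [[computeGCD(B[i], B[j]) if i < j else 0 for j in range(n)] for i in range(n)]
--
--     size = 1 << n
--     dp = [0] * size
--     for mask in reversed(range(size)):
--         if bin(mask).count('1') % 2:
--             continue  # odd masks are never reached by pairing two numbers at a time
--         op = bin(mask).count('1') // 2 + 1
--         best = 0
--         for i in range(n):
--             if mask >> i & 1:
--                 continue
--             for j in range(i + 1, n):
--                 if mask >> j & 1:
--                     continue
--                 v = op * g[i][j] + dp[mask | 1 << i | 1 << j]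
--                 if v > best:
--                     best = v
--         dp[mask] = best
--     return dp[0]
-- ===== Notes on version B (the rewrite author's own statement) =====
-- stated objective: alternative
-- what changed: Replaces the recursive dfs with a shared memo dict by an iterative bottom-up tabulation: a dp array of size 2^n filled for masks in decreasing order (odd-popcount masks, unreachable when numbers are removed two at a time, are skipped), deriving the operation number from the mask's popcount instead of threading it through recursion.
import Mathlib
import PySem

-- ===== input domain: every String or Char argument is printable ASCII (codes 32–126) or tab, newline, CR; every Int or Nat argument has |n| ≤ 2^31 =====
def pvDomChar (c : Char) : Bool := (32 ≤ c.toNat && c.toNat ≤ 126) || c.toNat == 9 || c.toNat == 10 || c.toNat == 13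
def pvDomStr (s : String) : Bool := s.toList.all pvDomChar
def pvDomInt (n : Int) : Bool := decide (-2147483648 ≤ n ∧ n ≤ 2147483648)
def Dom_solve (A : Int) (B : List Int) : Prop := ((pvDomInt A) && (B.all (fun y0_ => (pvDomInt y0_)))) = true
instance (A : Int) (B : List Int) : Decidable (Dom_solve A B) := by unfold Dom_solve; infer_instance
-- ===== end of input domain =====

-- B replaces A's recursive dfs + memo dict by a bottom-up tabulation over bitmasks in decreasing
-- order (skipping odd-popcount masks, which a pair-at-a-time pairing never reaches); the gcd
-- precomputation is kept.

-- Euclid's loop `while y: x, y = y, x % y` (shared helper of both Pythons); Python's `%`.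
-- Termination lemma for it (cited by `decreasing_by`):
theorem pyMod_natAbs_lt (x y : Int) (h : y ≠ 0) : (PySem.Int.mod x y).natAbs < y.natAbs := by
  rcases lt_or_gt_of_ne h with hneg | hpos
  · have := PySem.Int.mod_neg_bounds x hneg
    omega
  · have h1 := PySem.Int.mod_nonneg x hpos
    have h2 := PySem.Int.mod_lt x hpos
    omega

def pyGcd (x y : Int) : Int :=
  if h : y = 0 then x
  else pyGcd y (PySem.Int.mod x y)
termination_by y.natAbs
decreasing_by exact pyMod_natAbs_lt x y h

-- ===== PORT A =====
-- A's gcd table: entry (i, j) with i < j holds computeGCD(B[i], B[j]); indices are always in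
-- range, so the table is transliterated as the pure accessor `gcdTab` (same values, same calls).
def gcdTab (B : List Int) : Nat → Nat → Int :=
  fun i j => pyGcd (B.getD i 0) (B.getD j 0)

-- A's memo `cache = collections.defaultdict(int)`, keyed by bitmasks (all keys lie in
-- [0, 2^len(B))): modelled as an Array (Option Int) indexed by mask, `none` = key absent.
-- Reading `cache[mask]` through the defaultdict inserts 0 for a missing key:
def ddRead (c : Array (Option Int)) (m : Nat) : Int × Array (Option Int) :=
  match c.getD m none with
  | some v => (v, c)
  | none => (0, c.setIfInBounds m (some 0))

-- A's `dfs(mask, operation)`, with the memo cache threaded through explicitly (in Python it is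
-- a closure variable mutated in place).  Each loop iteration reads cache[mask] (defaultdict,
-- so a missing key becomes 0), recurses, and stores the max back — exactly the statement
-- `cache[mask] = max(cache[mask], score + dfs(newMask, operation + 1))`; at the end it returns
-- `cache[mask]` (again a defaultdict read).  `fuel` only bounds the recursion depth (a totality
-- guard, never reached: each recursive call strictly increases the mask below 2^n).
def dfsA (g : Nat → Nat → Int) (n : Nat) :
    Nat → Array (Option Int) → Nat → Int → Int × Array (Option Int)
  | 0, c, _, _ => (0, c)
  | fuel + 1, c, mask, op =>
    match c.getD mask none with
    | some v => (v, c)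
    | none =>
      let c := (List.range n).foldl (fun c i =>
        if (1 <<< i) &&& mask ≠ 0 then c
        else (List.range' (i + 1) (n - (i + 1))).foldl (fun c j =>
          if (1 <<< j) &&& mask ≠ 0 then c
          else
            let p := ddRead c mask
            let q := dfsA g n fuel p.2 (mask ||| (1 <<< i) ||| (1 <<< j)) (op + 1)
            q.2.setIfInBounds mask (some (max p.1 (op * g i j + q.1)))) c) c
      ddRead c mask

def solve (A : Int) (B : List Int) : Int :=
  (dfsA (gcdTab B) B.length (2 ^ B.length) (Array.replicate (2 ^ B.length) none) 0 1).1

-- ===== PORT B =====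
-- one iteration of Source B's `for mask in reversed(range(size))` body
def stepB (g : Nat → Nat → Int) (n : Nat) (dp : List Int) (mask : Nat) : List Int :=
  if PySem.Int.bitCount (mask : Int) % 2 = 1 then dp
  else
    let op : Int := ((PySem.Int.bitCount (mask : Int) / 2 : Nat) : Int) + 1
    let best := (List.range n).foldl (fun best i =>
      if mask >>> i &&& 1 = 1 then best
      else (List.range' (i + 1) (n - (i + 1))).foldl (fun best j =>
        if mask >>> j &&& 1 = 1 then best
        else
          let v := op * g i j + dp.getD (mask ||| 1 <<< i ||| 1 <<< j) 0
          if v > best then v else best) best) 0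
    dp.set mask best

def solve_alt (A : Int) (B : List Int) : Int :=
  let n := B.length
  let g := gcdTab B
  let size := 2 ^ n
  let dp := ((List.range size).reverse).foldl (stepB g n) (List.replicate size 0)
  dp.getD 0 0

-- ===== PRECONDITION & SPEC =====
def Spec_solve (A : Int) (B : List Int) (out : Int) : Prop := out = solve_alt A B
instance (A : Int) (B : List Int) (out : Int) : Decidable (Spec_solve A B out) := by unfold Spec_solve; infer_instance

-- ===== CLAIM (what is proved, stated in full; the proofs are below) =====
def Claim_equal_solve : Prop := ∀ (A : Int) (B : List Int), Dom_solve A B → Spec_solve A B (solve A B)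

-- ===== LEMMAS AND PROOFS =====


-- popcount of a Nat, as both Pythons compute it (bin(m).count('1'))
def pcN (m : Nat) : Nat := PySem.Int.bitCount (m : Int)

-- the memo-free value of A's dfs: the same recursion with the running maximum as an
-- accumulator and no cache (the reference point both ports are related to)
def dfsP (g : Nat → Nat → Int) (n : Nat) (fuel : Nat) (mask : Nat) (op : Int) : Int :=
  match fuel with
  | 0 => 0
  | fuel + 1 =>
    (List.range n).foldl (fun acc i =>
      if (1 <<< i) &&& mask ≠ 0 then acc
      else (List.range' (i + 1) (n - (i + 1))).foldl (fun acc j =>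
        if (1 <<< j) &&& mask ≠ 0 then acc
        else max acc (op * g i j +
               dfsP g n fuel (mask ||| (1 <<< i) ||| (1 <<< j)) (op + 1))) acc) 0

theorem testA_iff (mask i : Nat) : ((1 <<< i) &&& mask ≠ 0) ↔ mask.testBit i := by
  rw [Nat.shiftLeft_eq, one_mul, Nat.two_pow_and]
  cases h : mask.testBit i <;> simp

theorem testB_iff (mask i : Nat) : (mask >>> i &&& 1 = 1) ↔ mask.testBit i := by
  rw [Nat.testBit, Nat.and_comm 1 (mask >>> i)]
  have : mask >>> i &&& 1 ≤ 1 := Nat.and_le_right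
  cases h : mask >>> i &&& 1 <;> simp_all

theorem or_two_pow_eq_add (i : Nat) : ∀ m : Nat, m.testBit i = false → m ||| 2 ^ i = m + 2 ^ i := by
  induction i with
  | zero =>
    intro m h
    rw [Nat.testBit_zero] at h
    simp only [decide_eq_false_iff_not] at h
    have hd : (m ||| 2 ^ 0) / 2 = m / 2 := by rw [Nat.or_div_two]; simp
    have h1 : (m ||| 2 ^ 0).testBit 0 = true := by
      rw [Nat.testBit_lor]
      simp [Nat.testBit_zero]
    rw [Nat.testBit_zero] at h1
    simp only [decide_eq_true_eq] at h1
    omega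
  | succ i ih =>
    intro m h
    have hpow : (2:Nat) ^ (i + 1) = 2 * 2 ^ i := by rw [pow_succ]; ring
    have hp2 : (2:Nat) ^ (i + 1) / 2 = 2 ^ i := by omega
    have htb : (m / 2).testBit i = false := by rw [Nat.testBit_div_two]; exact h
    have hd : (m ||| 2 ^ (i + 1)) / 2 = m / 2 + 2 ^ i := by
      rw [Nat.or_div_two, hp2]; exact ih (m / 2) htb
    have hm0 : (m ||| 2 ^ (i + 1)).testBit 0 = m.testBit 0 := by
      rw [Nat.testBit_lor, Nat.testBit_two_pow_of_ne (by omega)]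
      simp
    rw [Nat.testBit_zero, Nat.testBit_zero] at hm0
    rcases Nat.mod_two_eq_zero_or_one m with h0 | h0 <;>
      rcases Nat.mod_two_eq_zero_or_one (m ||| 2 ^ (i + 1)) with h1 | h1 <;>
      simp [h0, h1] at hm0 <;> omega

theorem pcN_succ (m : Nat) (h : 0 < m) : pcN m = m % 2 + pcN (m / 2) := by
  unfold pcN
  exact PySem.Int.bitCount_natCast h

theorem pcN_add_two_pow (i : Nat) : ∀ m : Nat, m.testBit i = false → pcN (m + 2 ^ i) = pcN m + 1 := by
  induction i with
  | zero =>
    intro m h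
    rw [Nat.testBit_zero] at h
    simp only [decide_eq_false_iff_not] at h
    rcases Nat.eq_zero_or_pos m with rfl | hm
    · decide
    · have e1 : (m + 2 ^ 0) % 2 = 1 := by omega
      have e2 : (m + 2 ^ 0) / 2 = m / 2 := by omega
      rw [pcN_succ (m + 2 ^ 0) (by positivity), pcN_succ m hm, e1, e2]
      omega
  | succ i ih =>
    intro m h
    have hpow : (2:Nat) ^ (i + 1) = 2 * 2 ^ i := by rw [pow_succ]; ring
    have htb : (m / 2).testBit i = false := by rw [Nat.testBit_div_two]; exact h
    have harg : (m + 2 ^ (i + 1)) / 2 = m / 2 + 2 ^ i := by omega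
    have hmod : (m + 2 ^ (i + 1)) % 2 = m % 2 := by omega
    have hx : pcN (m + 2 ^ (i + 1)) = m % 2 + pcN (m / 2 + 2 ^ i) := by
      rw [pcN_succ _ (by positivity), harg, hmod]
    rw [ih (m / 2) htb] at hx
    rcases Nat.eq_zero_or_pos m with rfl | hm
    · simpa [pcN, PySem.Int.bitCount_zero] using hx
    · rw [pcN_succ m hm]
      omega

theorem testBit_add_two_pow_ne (m i j : Nat) (hi : m.testBit i = false) (hij : j ≠ i) :
    (m + 2 ^ i).testBit j = m.testBit j := by
  rw [← or_two_pow_eq_add i m hi, Nat.testBit_lor, Nat.testBit_two_pow_of_ne (Ne.symm hij)]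
  simp

theorem pcN_newMask (m i j : Nat) (hi : m.testBit i = false) (hj : m.testBit j = false)
    (hij : i ≠ j) : pcN (m ||| 1 <<< i ||| 1 <<< j) = pcN m + 2 := by
  rw [Nat.shiftLeft_eq, Nat.shiftLeft_eq, one_mul, one_mul,
      or_two_pow_eq_add i m hi,
      or_two_pow_eq_add j _ (by rw [testBit_add_two_pow_ne m i j hi (Ne.symm hij)]; exact hj),
      pcN_add_two_pow j _ (by rw [testBit_add_two_pow_ne m i j hi (Ne.symm hij)]; exact hj),
      pcN_add_two_pow i m hi]

theorem newMask_lt (n m i j : Nat) (hm : m < 2 ^ n) (hi : i < n) (hj : j < n) :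
    m ||| 1 <<< i ||| 1 <<< j < 2 ^ n := by
  rw [Nat.shiftLeft_eq, Nat.shiftLeft_eq, one_mul, one_mul]
  exact Nat.or_lt_two_pow (Nat.or_lt_two_pow hm (Nat.pow_lt_pow_right one_lt_two hi))
    (Nat.pow_lt_pow_right one_lt_two hj)

theorem newMask_ge (m i j : Nat) (hi : m.testBit i = false) :
    m + 1 ≤ m ||| 1 <<< i ||| 1 <<< j := by
  have hle : m ≤ m ||| 1 <<< i ||| 1 <<< j :=
    le_trans Nat.left_le_or Nat.left_le_or
  have hne : m ≠ m ||| 1 <<< i ||| 1 <<< j := by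
    intro he
    have : (m ||| 1 <<< i ||| 1 <<< j).testBit i = true := by
      rw [Nat.testBit_lor, Nat.testBit_lor, Nat.shiftLeft_eq, one_mul,
        Nat.testBit_two_pow_self]
      simp
    rw [← he, hi] at this
    exact Bool.false_ne_true this
  omega
theorem dfsP_fuel (g : Nat → Nat → Int) (n : Nat) :
    ∀ f f' mask op, mask < 2 ^ n → 2 ^ n ≤ mask + f → 2 ^ n ≤ mask + f' →
      dfsP g n f mask op = dfsP g n f' mask op := by
  intro f
  induction f with
  | zero => intro f' mask op h1 h2 h3; omega
  | succ f ih =>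
    intro f' mask op h1 h2 h3
    cases f' with
    | zero => omega
    | succ f' =>
      simp only [dfsP]
      apply PySem.List.foldl_congr_mem
      intro acc i hi
      rw [List.mem_range] at hi
      by_cases hb : mask.testBit i
      · have ht : (1 <<< i) &&& mask ≠ 0 := (testA_iff mask i).mpr hb
        simp only [if_pos ht]
      · have hbit : mask.testBit i = false := by simpa using hb
        have ht : ¬((1 <<< i) &&& mask ≠ 0) := fun hc => hb ((testA_iff mask i).mp hc)
        simp only [if_neg ht]
        apply PySem.List.foldl_congr_mem
        intro acc2 j hj
        rw [List.mem_range'_1] at hj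
        by_cases hbj : mask.testBit j
        · have htj : (1 <<< j) &&& mask ≠ 0 := (testA_iff mask j).mpr hbj
          simp only [if_pos htj]
        · have htj : ¬((1 <<< j) &&& mask ≠ 0) := fun hc => hbj ((testA_iff mask j).mp hc)
          simp only [if_neg htj]
          have hjn : j < n := by omega
          have hlt := newMask_lt n mask i j h1 hi hjn
          have hge := newMask_ge mask i j hbit
          rw [ih f' (mask ||| 1 <<< i ||| 1 <<< j) (op + 1) hlt (by omega) (by omega)]

-- `if v > best then v else best` is Int.max
theorem maxB_eq (a v : Int) : (if v > a then v else a) = max a v := by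
  rcases le_or_gt v a with h | h
  · simp [max_eq_left h, not_lt.mpr h]
  · simp [max_eq_right (le_of_lt h), h]

-- the invariant carried down the mask loop of B: every already-filled even-popcount entry
-- of dp holds A's dfs value for that mask (with the operation count popcount/2 + 1)
def InvB (g : Nat → Nat → Int) (n : Nat) (m : Nat) (dp : List Int) : Prop :=
  dp.length = 2 ^ n ∧
  ∀ k, m ≤ k → k < 2 ^ n → pcN k % 2 = 0 →
    dp.getD k 0 = dfsP g n (2 ^ n) k (((pcN k / 2 : Nat) : Int) + 1)

theorem stepB_preserves (g : Nat → Nat → Int) (n m : Nat) (dp : List Int)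
    (hm : m < 2 ^ n) (h : InvB g n (m + 1) dp) : InvB g n m (stepB g n dp m) := by
  obtain ⟨hlen, hinv⟩ := h
  by_cases hodd : PySem.Int.bitCount ((m : Nat) : Int) % 2 = 1
  · refine ⟨?_, ?_⟩
    · simp only [stepB, if_pos hodd]; exact hlen
    · intro k hk1 hk2 hk3
      simp only [stepB, if_pos hodd]
      rcases Nat.eq_or_lt_of_le hk1 with rfl | hlt
      · exfalso
        have : pcN m % 2 = 1 := hodd
        omega
      · exact hinv k hlt hk2 hk3
  · refine ⟨?_, ?_⟩
    · simp only [stepB, if_neg hodd, List.length_set]; exact hlen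
    · intro k hk1 hk2 hk3
      simp only [stepB, if_neg hodd]
      rcases Nat.eq_or_lt_of_le hk1 with rfl | hlt
      · rw [List.getD_eq_getElem?_getD, List.getElem?_set, if_pos rfl,
            if_pos (by omega : m < dp.length), Option.getD_some]
        obtain ⟨f, hf⟩ : ∃ f, 2 ^ n = f + 1 :=
          ⟨2 ^ n - 1, by have := Nat.one_le_two_pow (n := n); omega⟩
        rw [hf]
        simp only [dfsP]
        apply PySem.List.foldl_congr_mem
        intro acc i hi
        rw [List.mem_range] at hi
        by_cases hb : m.testBit i
        · rw [if_pos ((testB_iff m i).mpr hb), if_pos ((testA_iff m i).mpr hb)]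
        · have hbit : m.testBit i = false := by simpa using hb
          rw [if_neg (fun hc => hb ((testB_iff m i).mp hc)),
              if_neg (fun hc => hb ((testA_iff m i).mp hc))]
          apply PySem.List.foldl_congr_mem
          intro acc2 j hj
          rw [List.mem_range'_1] at hj
          by_cases hbj : m.testBit j
          · rw [if_pos ((testB_iff m j).mpr hbj), if_pos ((testA_iff m j).mpr hbj)]
          · have hbitj : m.testBit j = false := by simpa using hbj
            rw [if_neg (fun hc => hbj ((testB_iff m j).mp hc)),
                if_neg (fun hc => hbj ((testA_iff m j).mp hc))]
            have hjn : j < n := by omega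
            have hij : i ≠ j := by omega
            have hlt2 := newMask_lt n m i j hm hi hjn
            have hge2 := newMask_ge m i j hbit
            have hpc2 := pcN_newMask m i j hbit hbitj hij
            have heven : pcN m % 2 = 0 := by
              have : ¬ pcN m % 2 = 1 := hodd
              omega
            have hdp := hinv (m ||| 1 <<< i ||| 1 <<< j) (by omega) hlt2 (by omega)
            have hhalf : pcN (m ||| 1 <<< i ||| 1 <<< j) / 2 = pcN m / 2 + 1 := by omega
            have hop : ((pcN (m ||| 1 <<< i ||| 1 <<< j) / 2 : Nat) : Int) + 1
                = (((pcN m / 2 : Nat) : Int) + 1) + 1 := by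
              rw [hhalf]; push_cast; ring
            rw [hop] at hdp
            rw [hdp, dfsP_fuel g n (2 ^ n) f _ _ hlt2 (by omega) (by omega)]
            exact maxB_eq acc2 _
      · rw [List.getD_eq_getElem?_getD, List.getElem?_set, if_neg (by omega),
            ← List.getD_eq_getElem?_getD]
        exact hinv k hlt hk2 hk3

theorem foldB_inv (g : Nat → Nat → Int) (n : Nat) :
    ∀ (c m : Nat) (dp : List Int), m + c ≤ 2 ^ n → InvB g n (m + c) dp →
      InvB g n m (((List.range' m c).reverse).foldl (stepB g n) dp) := by
  intro c
  induction c with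
  | zero => intro m dp _ h2; simpa using h2
  | succ c ih =>
    intro m dp h1 h2
    rw [List.range'_succ, List.reverse_cons, List.foldl_append]
    simp only [List.foldl_cons, List.foldl_nil]
    apply stepB_preserves g n m _ (by omega)
    apply ih (m + 1) dp (by omega)
    have he : m + (c + 1) = (m + 1) + c := by omega
    rw [he] at h2
    exact h2


-- the operation number Python's recursion threads along, as a function of the mask
def opOf (k : Nat) : Int := ((pcN k / 2 : Nat) : Int) + 1

theorem opOf_newMask (m i j : Nat) (hi : m.testBit i = false) (hj : m.testBit j = false)
    (hij : i ≠ j) : opOf (m ||| 1 <<< i ||| 1 <<< j) = opOf m + 1 := by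
  unfold opOf
  rw [pcN_newMask m i j hi hj hij]
  have h2 : (pcN m + 2) / 2 = pcN m / 2 + 1 := by omega
  rw [h2]
  push_cast
  ring

theorem aget_set_self (c : Array (Option Int)) (m : Nat) (v : Option Int) (h : m < c.size) :
    (c.setIfInBounds m v).getD m none = v := by
  simp [Array.getD_eq_getD_getElem?, Array.getElem?_setIfInBounds, h]

theorem aget_set_ne (c : Array (Option Int)) (m k : Nat) (v : Option Int) (h : m ≠ k) :
    (c.setIfInBounds m v).getD k none = c.getD k none := by
  simp [Array.getD_eq_getD_getElem?, Array.getElem?_setIfInBounds, h]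

theorem ddRead_none (c : Array (Option Int)) (m : Nat) (h : c.getD m none = none) :
    ddRead c m = (0, c.setIfInBounds m (some 0)) := by
  unfold ddRead; rw [h]

theorem ddRead_some (c : Array (Option Int)) (m : Nat) (v : Int) (h : c.getD m none = some v) :
    ddRead c m = (v, c) := by
  unfold ddRead; rw [h]

-- two foldl's over the same list preserve a relation preserved by their steps
theorem foldl_rel {α γ δ : Type} (l : List α) (f : γ → α → γ) (g : δ → α → δ)
    (R : γ → δ → Prop) (h : ∀ x ∈ l, ∀ c d, R c d → R (f c x) (g d x)) :
    ∀ c d, R c d → R (l.foldl f c) (l.foldl g d) := by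
  induction l with
  | nil => intro c d hr; exact hr
  | cons x xs ih =>
    intro c d hr
    exact ih (fun y hy => h y (by simp [hy])) _ _ (h x (by simp) c d hr)

-- loop invariant for A's memo cache while dfs(mask) is being computed: entries below `mask`
-- (the ancestors' partial values) are untouched, entries above `mask` are finished and hold the
-- pure dfs value, and the entry at `mask` itself is the running maximum `acc` (absent ↔ acc = 0,
-- exactly defaultdict behaviour)
def MInv (g : Nat → Nat → Int) (n mask : Nat) (c₀ c : Array (Option Int)) (acc : Int) : Prop :=
  c.size = 2 ^ n ∧
  (∀ k, k < mask → c.getD k none = c₀.getD k none) ∧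
  (∀ k v, mask < k → c.getD k none = some v → v = dfsP g n (2 ^ n) k (opOf k)) ∧
  ((c.getD mask none = none ∧ acc = 0) ∨ c.getD mask none = some acc)

-- the memoized dfs computes the pure dfs value and leaves the cache correct
theorem dfsA_pure (g : Nat → Nat → Int) (n : Nat) :
    ∀ fuel c mask, mask < 2 ^ n → 2 ^ n ≤ mask + fuel → pcN mask % 2 = 0 →
      c.size = 2 ^ n →
      (∀ k v, mask ≤ k → c.getD k none = some v → v = dfsP g n (2 ^ n) k (opOf k)) →
      (dfsA g n fuel c mask (opOf mask)).1 = dfsP g n (2 ^ n) mask (opOf mask) ∧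
      (dfsA g n fuel c mask (opOf mask)).2.size = 2 ^ n ∧
      (∀ k, k < mask → (dfsA g n fuel c mask (opOf mask)).2.getD k none = c.getD k none) ∧
      (∀ k v, mask ≤ k → (dfsA g n fuel c mask (opOf mask)).2.getD k none = some v →
        v = dfsP g n (2 ^ n) k (opOf k)) := by
  intro fuel
  induction fuel with
  | zero => intro c mask h1 h2 _ _ _; omega
  | succ fuel ih =>
    intro c mask hm hf heven hsz hcorr
    cases hcm : c.getD mask none with
    | some v =>
      have e : dfsA g n (fuel + 1) c mask (opOf mask) = (v, c) := by
        simp only [dfsA, hcm]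
      rw [e]
      exact ⟨hcorr mask v (le_refl mask) hcm, hsz, fun k _ => rfl, hcorr⟩
    | none =>
      have e : dfsA g n (fuel + 1) c mask (opOf mask) =
          ddRead ((List.range n).foldl (fun c i =>
            if (1 <<< i) &&& mask ≠ 0 then c
            else (List.range' (i + 1) (n - (i + 1))).foldl (fun c j =>
              if (1 <<< j) &&& mask ≠ 0 then c
              else
                (dfsA g n fuel (ddRead c mask).2 (mask ||| (1 <<< i) ||| (1 <<< j))
                    (opOf mask + 1)).2.setIfInBounds mask
                  (some (max (ddRead c mask).1 (opOf mask * g i j +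
                    (dfsA g n fuel (ddRead c mask).2 (mask ||| (1 <<< i) ||| (1 <<< j))
                      (opOf mask + 1)).1)))) c) c) mask := by
        simp only [dfsA, hcm]
      have key : MInv g n mask c
          ((List.range n).foldl (fun c i =>
            if (1 <<< i) &&& mask ≠ 0 then c
            else (List.range' (i + 1) (n - (i + 1))).foldl (fun c j =>
              if (1 <<< j) &&& mask ≠ 0 then c
              else
                (dfsA g n fuel (ddRead c mask).2 (mask ||| (1 <<< i) ||| (1 <<< j))
                    (opOf mask + 1)).2.setIfInBounds mask
                  (some (max (ddRead c mask).1 (opOf mask * g i j +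
                    (dfsA g n fuel (ddRead c mask).2 (mask ||| (1 <<< i) ||| (1 <<< j))
                      (opOf mask + 1)).1)))) c) c)
          ((List.range n).foldl (fun acc i =>
            if (1 <<< i) &&& mask ≠ 0 then acc
            else (List.range' (i + 1) (n - (i + 1))).foldl (fun acc j =>
              if (1 <<< j) &&& mask ≠ 0 then acc
              else max acc (opOf mask * g i j +
                dfsP g n fuel (mask ||| (1 <<< i) ||| (1 <<< j)) (opOf mask + 1))) acc) 0) := by
        apply foldl_rel
        · intro i hi cc acc hInv
          rw [List.mem_range] at hi
          by_cases hb : mask.testBit i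
          · rw [if_pos ((testA_iff mask i).mpr hb), if_pos ((testA_iff mask i).mpr hb)]
            exact hInv
          · have hbit : mask.testBit i = false := by simpa using hb
            have hA : ¬((1 <<< i) &&& mask ≠ 0) := fun hc => hb ((testA_iff mask i).mp hc)
            rw [if_neg hA, if_neg hA]
            apply foldl_rel
            · intro j hj cc2 acc2 hInv2
              rw [List.mem_range'_1] at hj
              by_cases hbj : mask.testBit j
              · rw [if_pos ((testA_iff mask j).mpr hbj), if_pos ((testA_iff mask j).mpr hbj)]
                exact hInv2
              · have hbitj : mask.testBit j = false := by simpa using hbj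
                have hAj : ¬((1 <<< j) &&& mask ≠ 0) := fun hc => hbj ((testA_iff mask j).mp hc)
                rw [if_neg hAj, if_neg hAj]
                obtain ⟨hsz2, hlow2, hhigh2, hacc2⟩ := hInv2
                have hjn : j < n := by omega
                have hij : i ≠ j := by omega
                -- the defaultdict read of cache[mask]
                have hdd1 : (ddRead cc2 mask).1 = acc2 := by
                  rcases hacc2 with ⟨he, rfl⟩ | he
                  · rw [ddRead_none cc2 mask he]
                  · rw [ddRead_some cc2 mask acc2 he]
                have hdd2 : (ddRead cc2 mask).2.getD mask none = some acc2 := by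
                  rcases hacc2 with ⟨he, rfl⟩ | he
                  · rw [ddRead_none cc2 mask he]
                    exact aget_set_self cc2 mask (some 0) (by omega)
                  · rw [ddRead_some cc2 mask acc2 he]
                    exact he
                have hddsz : (ddRead cc2 mask).2.size = 2 ^ n := by
                  rcases hacc2 with ⟨he, _⟩ | he
                  · rw [ddRead_none cc2 mask he, Array.size_setIfInBounds]; exact hsz2
                  · rw [ddRead_some cc2 mask _ he]; exact hsz2
                have hddne : ∀ k, k ≠ mask → (ddRead cc2 mask).2.getD k none = cc2.getD k none := by
                  intro k hk
                  rcases hacc2 with ⟨he, _⟩ | he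
                  · rw [ddRead_none cc2 mask he]
                    exact aget_set_ne cc2 mask k (some 0) (Ne.symm hk)
                  · rw [ddRead_some cc2 mask _ he]
                have hnmlt := newMask_lt n mask i j hm hi hjn
                have hnmge := newMask_ge mask i j hbit
                have hpc := pcN_newMask mask i j hbit hbitj hij
                have hop := opOf_newMask mask i j hbit hbitj hij
                have ihres := ih (ddRead cc2 mask).2 (mask ||| 1 <<< i ||| 1 <<< j)
                  hnmlt (by omega) (by omega) hddsz
                  (by
                    intro k v hk hkv
                    exact hhigh2 k v (by omega) (by rw [← hddne k (by omega)]; exact hkv))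
                rw [hop] at ihres
                obtain ⟨ih1, ih2, ih3, ih4⟩ := ihres
                have hpf : dfsP g n (2 ^ n) (mask ||| 1 <<< i ||| 1 <<< j) (opOf mask + 1)
                    = dfsP g n fuel (mask ||| 1 <<< i ||| 1 <<< j) (opOf mask + 1) :=
                  dfsP_fuel g n (2 ^ n) fuel _ _ hnmlt (by omega) (by omega)
                show MInv g n mask c
                  ((dfsA g n fuel (ddRead cc2 mask).2 (mask ||| (1 <<< i) ||| (1 <<< j))
                      (opOf mask + 1)).2.setIfInBounds mask
                    (some (max (ddRead cc2 mask).1 (opOf mask * g i j +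
                      (dfsA g n fuel (ddRead cc2 mask).2 (mask ||| (1 <<< i) ||| (1 <<< j))
                        (opOf mask + 1)).1)))) _
                refine ⟨?_, ?_, ?_, ?_⟩
                · rw [Array.size_setIfInBounds]; exact ih2
                · intro k hk
                  rw [aget_set_ne _ mask k _ (by omega), ih3 k (by omega),
                      hddne k (by omega)]
                  exact hlow2 k hk
                · intro k v hk hkv
                  rcases Nat.lt_or_ge k (mask ||| 1 <<< i ||| 1 <<< j) with hlt | hge
                  · rw [aget_set_ne _ mask k _ (by omega), ih3 k hlt,
                        hddne k (by omega)] at hkv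
                    exact hhigh2 k v hk hkv
                  · rw [aget_set_ne _ mask k _ (by omega)] at hkv
                    exact ih4 k v hge hkv
                · right
                  rw [aget_set_self _ mask _ (by omega), hdd1, ih1, hpf]
            · exact hInv
        · exact ⟨hsz, fun k _ => rfl,
            fun k v hk hkv => hcorr k v (le_of_lt hk) hkv, Or.inl ⟨hcm, rfl⟩⟩
      have epure : dfsP g n (fuel + 1) mask (opOf mask) =
          (List.range n).foldl (fun acc i =>
            if (1 <<< i) &&& mask ≠ 0 then acc
            else (List.range' (i + 1) (n - (i + 1))).foldl (fun acc j =>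
              if (1 <<< j) &&& mask ≠ 0 then acc
              else max acc (opOf mask * g i j +
                dfsP g n fuel (mask ||| (1 <<< i) ||| (1 <<< j)) (opOf mask + 1))) acc) 0 := by
        simp only [dfsP]
      have hfix : dfsP g n (2 ^ n) mask (opOf mask) = dfsP g n (fuel + 1) mask (opOf mask) :=
        dfsP_fuel g n (2 ^ n) (fuel + 1) mask (opOf mask) hm (by omega) (by omega)
      rw [e]
      obtain ⟨ksz, klow, khigh, kacc⟩ := key
      rw [hfix, epure]
      rcases kacc with ⟨he, hz⟩ | he
      · rw [ddRead_none _ _ he]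
        dsimp only
        refine ⟨hz.symm, ?_, ?_, ?_⟩
        · rw [Array.size_setIfInBounds]; exact ksz
        · intro k hk
          rw [aget_set_ne _ mask k _ (by omega)]
          exact klow k hk
        · intro k v hk hkv
          rcases Nat.eq_or_lt_of_le hk with rfl | hlt
          · rw [aget_set_self _ mask _ (by omega)] at hkv
            cases hkv
            rw [hfix, epure]
            exact hz.symm
          · rw [aget_set_ne _ mask k _ (by omega)] at hkv
            exact khigh k v hlt hkv
      · rw [ddRead_some _ _ _ he]
        dsimp only
        refine ⟨rfl, ksz, klow, ?_⟩
        intro k v hk hkv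
        rcases Nat.eq_or_lt_of_le hk with rfl | hlt
        · rw [he] at hkv
          cases hkv
          rw [hfix, epure]
        · exact khigh k v hlt hkv

-- ===== VERDICT (by name: the statement is the Claim_ definition above) =====
theorem solve_spec : Claim_equal_solve := by
  intro A B _
  unfold Spec_solve solve solve_alt
  -- B's side: the dp tabulation computes the pure dfs values
  have hstart : InvB (gcdTab B) B.length (0 + 2 ^ B.length) (List.replicate (2 ^ B.length) 0) := by
    refine ⟨by simp, ?_⟩
    intro k hk1 hk2 _
    omega
  have hinv := foldB_inv (gcdTab B) B.length (2 ^ B.length) 0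
    (List.replicate (2 ^ B.length) 0) (by omega) hstart
  obtain ⟨hl, hv⟩ := hinv
  have h0 := hv 0 (le_refl 0) (by positivity) (by simp [pcN, PySem.Int.bitCount_zero])
  simp only [pcN, PySem.Int.bitCount_zero, Nat.zero_div, Nat.cast_zero, zero_add] at h0
  -- A's side: the memoized dfs computes the pure dfs value
  have hop0 : opOf 0 = 1 := by
    simp [opOf, pcN, PySem.Int.bitCount_zero]
  have hA := dfsA_pure (gcdTab B) B.length (2 ^ B.length)
    (Array.replicate (2 ^ B.length) none) 0 (by positivity) (by omega)
    (by simp [pcN, PySem.Int.bitCount_zero])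
    (by rw [Array.size_replicate])
    (by
      intro k v _ hkv
      rw [Array.getD_eq_getD_getElem?, Array.getElem?_replicate] at hkv
      split at hkv <;> simp_all)
  rw [hop0] at hA
  rw [hA.1]
  dsimp only
  rw [List.range_eq_range']
  exact h0.symm
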